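-- pv_equiv track=rewrite | github.com/sotrusted/jayden-ai | src/spite_ai/data_manager.py | _align_metadata
-- ===== SOURCE A (Python) =====
-- from typing import Dict, Iterable, List, Optional, Sequence, Tuple
--
-- def _align_metadata(
--     original_texts: Sequence[str],
--     original_metadata: Sequence[dict],
--     filtered_texts: Sequence[str],
-- ) -> List[dict]:
--     filtered_meta: List[dict] = []
--     pointer = 0
--     for text, meta in zip(original_texts, original_metadata):
--         if pointer >= len(filtered_texts):
--             break
--         if text == filtered_texts[pointer]:
--             filtered_meta.append(meta)
--             pointer += 1
--     return filtered_meta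
-- ===== SOURCE B (Python) =====
-- def _align_metadata(original_texts, original_metadata, filtered_texts):
--     n = min(len(original_texts), len(original_metadata))
--     out = []
--     idx = 0
--     for f in filtered_texts:
--         try:
--             idx = original_texts.index(f, idx, n) + 1
--         except ValueError:
--             break
--         out.append(original_metadata[idx - 1])
--     return out
-- ===== Notes on version B (the rewrite author's own statement) =====
-- stated objective: idiomatic
-- what changed: B iterates over filtered_texts and finds each match with list.index(f, start, stop) over the (zip-truncated) originals, instead of A's single walk over zip(original_texts, original_metadata) with a pointer into filtered_texts.
import Mathlib
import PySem

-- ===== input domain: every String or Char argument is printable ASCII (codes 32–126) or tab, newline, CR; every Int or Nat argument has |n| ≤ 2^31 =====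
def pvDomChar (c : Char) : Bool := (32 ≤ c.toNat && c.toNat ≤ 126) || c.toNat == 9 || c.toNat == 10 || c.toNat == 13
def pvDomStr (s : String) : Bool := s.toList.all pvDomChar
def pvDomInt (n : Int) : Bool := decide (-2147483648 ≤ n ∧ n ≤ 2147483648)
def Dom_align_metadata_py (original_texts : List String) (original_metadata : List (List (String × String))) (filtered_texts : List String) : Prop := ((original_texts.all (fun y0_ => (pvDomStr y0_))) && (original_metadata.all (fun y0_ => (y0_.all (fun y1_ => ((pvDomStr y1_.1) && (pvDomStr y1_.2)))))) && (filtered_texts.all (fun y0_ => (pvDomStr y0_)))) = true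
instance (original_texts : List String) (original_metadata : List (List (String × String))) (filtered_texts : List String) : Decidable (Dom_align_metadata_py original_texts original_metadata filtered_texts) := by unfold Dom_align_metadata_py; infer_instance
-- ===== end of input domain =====

-- B replaces A's single walk over zip(texts, metadata) with a pointer into filtered_texts
-- by an iteration over filtered_texts that locates each match via list.index(f, start, stop) (idiomatic).


-- ===== PORT A =====
-- the 'for text, meta in zip(...)' loop with pointer and break, as structural recursion on the zipped list;
-- filtered_texts[pointer] is only read when pointer < len(filtered_texts), so getD is exact there
def pvGoA (ft : List String) : List (String × List (String × String)) → Nat → List (List (String × String))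
  | [], _ => []
  | (t, m) :: rest, p =>
    if ft.length ≤ p then []
    else if t = ft.getD p "" then m :: pvGoA ft rest (p + 1)
    else pvGoA ft rest p

def align_metadata_py (original_texts : List String) (original_metadata : List (List (String × String))) (filtered_texts : List String) : List (List (String × String)) :=
  pvGoA filtered_texts (original_texts.zip original_metadata) 0

-- ===== PORT B =====
-- hand port of Python's list.index(f, idx, n): first position j in [idx, idx+fuel) with ot[j] = f,
-- returning idx+fuel (≥ n when fuel = n - idx) if absent — exact: ValueError ↔ result ≥ n
def pvFindFrom (ot : List String) (f : String) : Nat → Nat → Nat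
  | idx, 0 => idx
  | idx, fuel + 1 => if ot.getD idx "" = f then idx else pvFindFrom ot f (idx + 1) fuel

-- the 'for f in filtered_texts' loop of B; break on ValueError ↔ the found index reaching n
def pvGoB (ot : List String) (om : List (List (String × String))) (n : Nat) : List String → Nat → List (List (String × String))
  | [], _ => []
  | f :: fs, idx =>
    let j := pvFindFrom ot f idx (n - idx)
    if n ≤ j then [] else om.getD j [] :: pvGoB ot om n fs (j + 1)

def align_metadata_py_alt (original_texts : List String) (original_metadata : List (List (String × String))) (filtered_texts : List String) : List (List (String × String)) :=
  pvGoB original_texts original_metadata (min original_texts.length original_metadata.length) filtered_texts 0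

-- ===== PRECONDITION & SPEC =====
def Spec_align_metadata_py (original_texts : List String) (original_metadata : List (List (String × String))) (filtered_texts : List String) (out : List (List (String × String))) : Prop := out = align_metadata_py_alt original_texts original_metadata filtered_texts
instance (original_texts : List String) (original_metadata : List (List (String × String))) (filtered_texts : List String) (out : List (List (String × String))) : Decidable (Spec_align_metadata_py original_texts original_metadata filtered_texts out) := by unfold Spec_align_metadata_py; infer_instance

-- ===== CLAIM (what is proved, stated in full; the proofs are below) =====
def Claim_equal_align_metadata_py : Prop := ∀ (original_texts : List String) (original_metadata : List (List (String × String))) (filtered_texts : List String), Dom_align_metadata_py original_texts original_metadata filtered_texts → Spec_align_metadata_py original_texts original_metadata filtered_texts (align_metadata_py original_texts original_metadata filtered_texts)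

-- ===== LEMMAS AND PROOFS =====

-- common functional characterisation: greedy matching of the filtered list against the zipped pairs
def pvGreedy : List (String × List (String × String)) → List String → List (List (String × String))
  | [], _ => []
  | (t, m) :: rest, fl =>
    match fl with
    | [] => []
    | f :: fs => if t = f then m :: pvGreedy rest fs else pvGreedy rest (f :: fs)

theorem pvGreedy_nil_right (zl : List (String × List (String × String))) : pvGreedy zl [] = [] := by
  cases zl with
  | nil => rfl
  | cons hd tl => cases hd; rfl

theorem pvGoA_eq_greedy (ft : List String) (zl : List (String × List (String × String))) :
    ∀ p, pvGoA ft zl p = pvGreedy zl (ft.drop p) := by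
  induction zl with
  | nil => intro p; rfl
  | cons hd rest ih =>
    intro p
    obtain ⟨t, m⟩ := hd
    rw [pvGoA]
    by_cases hp : ft.length ≤ p
    · rw [if_pos hp, List.drop_eq_nil_of_le hp]
      simp only [pvGreedy]
    · have hp' : p < ft.length := Nat.lt_of_not_le hp
      have hdrop : ft.drop p = ft[p] :: ft.drop (p + 1) := List.drop_eq_getElem_cons hp'
      have hgd : ft.getD p "" = ft[p] := List.getD_eq_getElem ft "" hp'
      rw [if_neg hp, hgd, hdrop]
      simp only [pvGreedy]
      by_cases ht : t = ft[p]
      · rw [if_pos ht, if_pos ht, ih]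
      · rw [if_neg ht, if_neg ht, ih, hdrop]

theorem pvFind_step (ot : List String) (om : List (List (String × String))) (f : String)
    (fs : List String) :
    ∀ fuel idx, min ot.length om.length - idx = fuel →
      pvGreedy ((ot.zip om).drop idx) (f :: fs) =
        (if min ot.length om.length ≤ pvFindFrom ot f idx fuel then []
         else om.getD (pvFindFrom ot f idx fuel) [] ::
           pvGreedy ((ot.zip om).drop (pvFindFrom ot f idx fuel + 1)) fs) := by
  intro fuel
  induction fuel with
  | zero =>
    intro idx h
    have hn : min ot.length om.length ≤ idx := Nat.le_of_sub_eq_zero h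
    have hlen : (ot.zip om).length ≤ idx := by simpa [List.length_zip] using hn
    rw [List.drop_eq_nil_of_le hlen]
    simp [pvFindFrom, hn, pvGreedy]
  | succ fuel ih =>
    intro idx h
    have hidx : idx < min ot.length om.length := by omega
    have hzl : idx < (ot.zip om).length := by simpa [List.length_zip] using hidx
    have hot : idx < ot.length := lt_of_lt_of_le hidx (Nat.min_le_left _ _)
    have hom : idx < om.length := lt_of_lt_of_le hidx (Nat.min_le_right _ _)
    have hdrop : (ot.zip om).drop idx = (ot.zip om)[idx] :: (ot.zip om).drop (idx + 1) :=
      List.drop_eq_getElem_cons hzl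
    have hzget : (ot.zip om)[idx] = (ot[idx], om[idx]) := List.getElem_zip
    have hgd : ot.getD idx "" = ot[idx] := List.getD_eq_getElem ot "" hot
    by_cases ht : ot[idx] = f
    · have homd : om.getD idx [] = om[idx] := List.getD_eq_getElem om [] hom
      have hfind : pvFindFrom ot f idx (fuel + 1) = idx := by
        rw [pvFindFrom, hgd, if_pos ht]
      rw [hdrop, hzget, hfind, if_neg (Nat.not_le.mpr hidx), homd]
      simp only [pvGreedy]
      rw [if_pos ht]
    · have hne : ¬ (ot.getD idx "" = f) := by rw [hgd]; exact ht
      have := ih (idx + 1) (by omega)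
      simp only [pvFindFrom, hne, if_false, hdrop, hzget, pvGreedy, ht]
      exact this

theorem pvGoB_eq_greedy (ot : List String) (om : List (List (String × String))) :
    ∀ fl idx, pvGoB ot om (min ot.length om.length) fl idx = pvGreedy ((ot.zip om).drop idx) fl := by
  intro fl
  induction fl with
  | nil => intro idx; simp [pvGoB, pvGreedy_nil_right]
  | cons f fs ih =>
    intro idx
    rw [pvGoB, pvFind_step ot om f fs (min ot.length om.length - idx) idx rfl]
    by_cases hj : min ot.length om.length ≤ pvFindFrom ot f idx (min ot.length om.length - idx)
    · simp [hj]
    · simp [hj, ih]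

-- ===== VERDICT (by name: the statement is the Claim_ definition above) =====
theorem align_metadata_py_spec : Claim_equal_align_metadata_py := by
  intro ot om ft _
  show align_metadata_py ot om ft = align_metadata_py_alt ot om ft
  rw [align_metadata_py, align_metadata_py_alt, pvGoA_eq_greedy, pvGoB_eq_greedy]
  simp
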